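-- pv_equiv track=rewrite | github.com/mlotocki2k/KSeF_Monitor | app/pdf_constants.py | _resolve_vat_summary_labels
-- ===== SOURCE A (Python) =====
-- from typing import Dict, List
--
-- _P12_TO_P13: Dict[str, str] = {
--     '22': 'P_13_1', '23': 'P_13_1',
--     '7': 'P_13_2', '8': 'P_13_2',
-- }
--
-- def _resolve_vat_summary_labels(items: list) -> dict:
--     """Determine actual VAT rate labels from invoice line items.
--
--     For ambiguous summary rows (P_13_1 covers 22%/23%, P_13_2 covers 7%/8%),
--     inspect the items' P_12 values to build a precise label.
--     """
--     labels = {}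
--     for p13_field in ('P_13_1', 'P_13_2'):
--         possible = [p12 for p12, p13 in _P12_TO_P13.items() if p13 == p13_field]
--         actual = sorted(
--             {it['p12'] for it in items if it.get('p12') in possible},
--             key=lambda x: int(x),
--         )
--         if actual:
--             labels[p13_field] = ' / '.join(f'{r}%' for r in actual)
--     return labels
-- ===== SOURCE B (Python) =====
-- _P12_TO_P13 = {
--     '22': 'P_13_1', '23': 'P_13_1',
--     '7': 'P_13_2', '8': 'P_13_2',
-- }
--
-- def _resolve_vat_summary_labels(items: list) -> dict:
--     """Single pass over items: group the seen P_12 rates by their P_13 field,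
--     then emit the labels for the two fields in fixed order."""
--     groups = {}
--     for it in items:
--         p12 = it.get('p12')
--         p13 = _P12_TO_P13.get(p12)
--         if p13 is not None:
--             groups.setdefault(p13, set()).add(p12)
--     labels = {}
--     for field in ('P_13_1', 'P_13_2'):
--         if field in groups:
--             labels[field] = ' / '.join(f'{r}%' for r in sorted(groups[field], key=int))
--     return labels
-- ===== Notes on version B (the rewrite author's own statement) =====
-- stated objective: simpler
-- what changed: One pass over the items that dispatches each p12 value through the mapping into a per-field grouping dict, replacing the outer loop over fields that rescans all items and rebuilds the candidate list each time.
import Mathlib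
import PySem

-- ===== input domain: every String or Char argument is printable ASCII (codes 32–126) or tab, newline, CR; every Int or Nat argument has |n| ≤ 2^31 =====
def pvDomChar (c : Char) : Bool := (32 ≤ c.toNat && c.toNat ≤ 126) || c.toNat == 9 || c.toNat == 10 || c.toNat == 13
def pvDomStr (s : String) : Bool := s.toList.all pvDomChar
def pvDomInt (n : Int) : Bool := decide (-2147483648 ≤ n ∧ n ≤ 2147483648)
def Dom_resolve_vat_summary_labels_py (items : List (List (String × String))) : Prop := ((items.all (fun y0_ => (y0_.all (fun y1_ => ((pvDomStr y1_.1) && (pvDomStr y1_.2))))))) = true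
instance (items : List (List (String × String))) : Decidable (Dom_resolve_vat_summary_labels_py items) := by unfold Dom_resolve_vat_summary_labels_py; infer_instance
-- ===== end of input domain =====

-- B replaces A's per-field rescans of the items by a single grouping pass over the items ('simpler').


-- the module constant _P12_TO_P13
def pvP12toP13 : PySem.Dict String String :=
  PySem.Dict.ofList [("22", "P_13_1"), ("23", "P_13_1"), ("7", "P_13_2"), ("8", "P_13_2")]

-- key=lambda x: int(x); int(x) never raises here since x is always one of '22','23','7','8'
def pvKeyInt (x : String) : Int := (PySem.Int.ofStr? x).getD 0

-- ===== PORT A =====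
-- {it['p12'] for it in items if it.get('p12') in possible}: one fold adding it['p12'] when the guard holds
def pvSetComp (possible : List String) (items : List (List (String × String))) (s : PySem.Set String) : PySem.Set String :=
  items.foldl (fun s it =>
    match (PySem.Dict.mk it).get? "p12" with
    | some v => if possible.contains v then PySem.Set.add s v else s
    | none => s) s

def resolve_vat_summary_labels_py (items : List (List (String × String))) : List (String × String) :=
  (((["P_13_1", "P_13_2"] : List String).foldl (fun (labels : PySem.Dict String String) p13_field =>
    let possible : List String :=
      pvP12toP13.items.filterMap (fun pr => if pr.2 == p13_field then some pr.1 else none)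
    let actual := PySem.List.sorted (pvSetComp possible items PySem.Set.empty) pvKeyInt false
    if actual.isEmpty then labels
    else labels.insert p13_field (PySem.Str.join " / " (actual.map (fun r => r ++ "%"))))
    PySem.Dict.empty)).items

-- ===== PORT B =====
-- groups.setdefault(p13, set()).add(p12): the in-place add is an insert of the updated set (position kept)
def pvGroupStep (g : PySem.Dict String (PySem.Set String)) (it : List (String × String)) :
    PySem.Dict String (PySem.Set String) :=
  match (PySem.Dict.mk it).get? "p12" with
  | some p12 =>
    match pvP12toP13.get? p12 with
    | some p13 => g.insert p13 (PySem.Set.add (g.getD p13 PySem.Set.empty) p12)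
    | none => g
  | none => g

def resolve_vat_summary_labels_py_alt (items : List (List (String × String))) : List (String × String) :=
  let groups := items.foldl pvGroupStep PySem.Dict.empty
  (((["P_13_1", "P_13_2"] : List String).foldl (fun (labels : PySem.Dict String String) field =>
    match groups.get? field with
    | some s => labels.insert field
        (PySem.Str.join " / " ((PySem.List.sorted s pvKeyInt false).map (fun r => r ++ "%")))
    | none => labels)
    PySem.Dict.empty)).items

-- ===== PRECONDITION & SPEC =====
def Spec_resolve_vat_summary_labels_py (items : List (List (String × String))) (out : List (String × String)) : Prop := out = resolve_vat_summary_labels_py_alt items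
instance (items : List (List (String × String))) (out : List (String × String)) : Decidable (Spec_resolve_vat_summary_labels_py items out) := by unfold Spec_resolve_vat_summary_labels_py; infer_instance

-- ===== CLAIM (what is proved, stated in full; the proofs are below) =====
def Claim_equal_resolve_vat_summary_labels_py : Prop := ∀ (items : List (List (String × String))), Dom_resolve_vat_summary_labels_py items → Spec_resolve_vat_summary_labels_py items (resolve_vat_summary_labels_py items)

-- ===== LEMMAS AND PROOFS =====

-- B's optional accumulator for one fixed field, as produced by looking the field up in groups
def pvCollectB (f : String) (items : List (List (String × String))) (o : Option (PySem.Set String)) :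
    Option (PySem.Set String) :=
  items.foldl (fun o it =>
    match (PySem.Dict.mk it).get? "p12" with
    | some v =>
      if pvP12toP13.get? v == some f then some (PySem.Set.add (o.getD PySem.Set.empty) v) else o
    | none => o) o

lemma pvP12toP13_mk :
    pvP12toP13 = PySem.Dict.mk [("22", "P_13_1"), ("23", "P_13_1"), ("7", "P_13_2"), ("8", "P_13_2")] := by
  decide

lemma pvPossible1 :
    pvP12toP13.items.filterMap (fun pr => if pr.2 == ("P_13_1" : String) then some pr.1 else none)
      = ["22", "23"] := by decide

lemma pvPossible2 :
    pvP12toP13.items.filterMap (fun pr => if pr.2 == ("P_13_2" : String) then some pr.1 else none)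
      = ["7", "8"] := by decide

lemma pv_poss1 (v : String) :
    (["22", "23"] : List String).contains v = (pvP12toP13.get? v == some "P_13_1") := by
  rw [pvP12toP13_mk]
  by_cases h22 : ("22" : String) = v
  · subst h22; decide
  · by_cases h23 : ("23" : String) = v
    · subst h23; decide
    · by_cases h7 : ("7" : String) = v
      · subst h7; decide
      · by_cases h8 : ("8" : String) = v
        · subst h8; decide
        · simp [beq_iff_eq, h22, h23, h7, h8, Ne.symm h22, Ne.symm h23, PySem.Dict.get?]

lemma pv_poss2 (v : String) :
    (["7", "8"] : List String).contains v = (pvP12toP13.get? v == some "P_13_2") := by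
  rw [pvP12toP13_mk]
  by_cases h22 : ("22" : String) = v
  · subst h22; decide
  · by_cases h23 : ("23" : String) = v
    · subst h23; decide
    · by_cases h7 : ("7" : String) = v
      · subst h7; decide
      · by_cases h8 : ("8" : String) = v
        · subst h8; decide
        · simp [beq_iff_eq, h22, h23, h7, h8, Ne.symm h7, Ne.symm h8, PySem.Dict.get?]

lemma pvSetComp_ne_nil (possible : List String) (items : List (List (String × String)))
    (s : PySem.Set String) (hs : s ≠ []) : pvSetComp possible items s ≠ [] := by
  induction items generalizing s with
  | nil => exact hs
  | cons it rest ih =>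
    simp only [pvSetComp, List.foldl_cons] at *
    cases (PySem.Dict.mk it).get? "p12" with
    | none => exact ih s hs
    | some v =>
      dsimp only
      by_cases h : possible.contains v = true
      · rw [if_pos h]
        apply ih
        simp only [PySem.Set.add]
        split
        · exact hs
        · simp
      · rw [if_neg h]; exact ih s hs

lemma pvCollectB_some (f : String) (possible : List String)
    (hp : ∀ v, possible.contains v = (pvP12toP13.get? v == some f)) :
    ∀ (items : List (List (String × String))) (s : PySem.Set String),
      pvCollectB f items (some s) = some (pvSetComp possible items s) := by
  intro items
  induction items with
  | nil => intro s; rfl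
  | cons it rest ih =>
    intro s
    simp only [pvCollectB, pvSetComp, List.foldl_cons] at *
    cases (PySem.Dict.mk it).get? "p12" with
    | none => exact ih s
    | some v =>
      dsimp only
      rw [← hp v]
      by_cases h : possible.contains v = true
      · rw [if_pos h, if_pos h]; exact ih _
      · rw [if_neg h, if_neg h]; exact ih s

lemma pvCollectB_none (f : String) (possible : List String)
    (hp : ∀ v, possible.contains v = (pvP12toP13.get? v == some f)) :
    ∀ (items : List (List (String × String))),
      pvCollectB f items none =
        if pvSetComp possible items PySem.Set.empty = [] then none
        else some (pvSetComp possible items PySem.Set.empty) := by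
  intro items
  induction items with
  | nil => rfl
  | cons it rest ih =>
    simp only [pvCollectB, pvSetComp, List.foldl_cons] at *
    cases (PySem.Dict.mk it).get? "p12" with
    | none => exact ih
    | some v =>
      dsimp only
      rw [← hp v]
      by_cases h : possible.contains v = true
      · simp only [if_pos h]
        simp only [Option.getD_none]
        have h2 := pvCollectB_some f possible hp rest (PySem.Set.add PySem.Set.empty v)
        simp only [pvCollectB, pvSetComp] at h2
        rw [h2]
        have h3 : pvSetComp possible rest (PySem.Set.add PySem.Set.empty v) ≠ [] := by
          apply pvSetComp_ne_nil
          simp [PySem.Set.add, PySem.Set.empty, PySem.Set.contains]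
        simp only [pvSetComp] at h3
        rw [if_neg h3]
      · simp only [if_neg h]; exact ih

lemma pvGroups_get? (items : List (List (String × String))) (f : String) :
    ∀ (g : PySem.Dict String (PySem.Set String)),
      (items.foldl pvGroupStep g).get? f = pvCollectB f items (g.get? f) := by
  induction items with
  | nil => intro g; rfl
  | cons it rest ih =>
    intro g
    simp only [List.foldl_cons, pvCollectB, pvGroupStep] at *
    cases (PySem.Dict.mk it).get? "p12" with
    | none => exact ih g
    | some v =>
      dsimp only
      cases hm : pvP12toP13.get? v with
      | none =>
        dsimp only
        rw [ih g]
        have : ((none : Option String) == some f) = false := rfl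
        simp only [this, Bool.false_eq_true, if_false]
      | some f' =>
        dsimp only
        rw [ih _]
        by_cases hf : f = f'
        · subst hf
          rw [PySem.Dict.get?_insert_self]
          simp only [beq_self_eq_true, if_true, PySem.Dict.getD_eq_get?_getD]
        · rw [PySem.Dict.get?_insert_of_ne _ _ hf]
          have : (some f' == some f) = false := by
            simp; exact fun h => hf h.symm
          simp only [this, Bool.false_eq_true, if_false]

-- ===== VERDICT (by name: the statement is the Claim_ definition above) =====
theorem resolve_vat_summary_labels_py_spec : Claim_equal_resolve_vat_summary_labels_py := by
  intro items _
  unfold Spec_resolve_vat_summary_labels_py resolve_vat_summary_labels_py resolve_vat_summary_labels_py_alt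
  simp only [List.foldl_cons, List.foldl_nil, pvPossible1, pvPossible2,
    pvGroups_get?, PySem.Dict.get?_empty,
    pvCollectB_none "P_13_1" ["22", "23"] pv_poss1,
    pvCollectB_none "P_13_2" ["7", "8"] pv_poss2]
  by_cases h1 : pvSetComp ["22", "23"] items ([] : PySem.Set String) = [] <;>
    by_cases h2 : pvSetComp ["7", "8"] items ([] : PySem.Set String) = [] <;>
      simp [h1, h2, PySem.List.sorted_eq_nil_iff, List.isEmpty_iff]
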